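-- pv_equiv track=rewrite | github.com/udonehn/Algorithm | 백준/Silver/31395. 정렬된 연속한 부분수열의 개수/정렬된 연속한 부분수열의 개수.py | solve
-- ===== SOURCE A (Python) =====
-- def solve(N, arr):
--     answer = 0
--     count = 0
--     last = 0
--     for n in arr+[0]:
--         if n > last:
--             count += 1
--         else:
--             answer += count*(count-1)//2
--             count = 1
--         last = n
--     return answer + N
-- ===== SOURCE B (Python) =====
-- def solve(N, arr):
--     total = N
--     dp = 0
--     prev = None
--     for x in arr:
--         dp = dp + 1 if prev is not None and x > prev else 1
--         total += dp - 1
--         prev = x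
--     return total
-- ===== Notes on version B (the rewrite author's own statement) =====
-- stated objective: alternative
-- what changed: B counts each sorted subarray once at its right endpoint via a running dp (length of the increasing run ending there), accumulating N + sum(dp-1) in one pass with no sentinel element and no per-run closed-form flush count*(count-1)//2.
-- intended difference: When arr has at least two elements and ends in a strictly increasing pair of negative numbers, A's trailing sentinel 0 extends the final run instead of flushing it so A silently omits that run's count (returning too small a value), while B returns the intended full count of sorted contiguous subarrays. — e.g. on solve(2, [-3, -2]): A returns 2, B returns 3
import Mathlib
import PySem

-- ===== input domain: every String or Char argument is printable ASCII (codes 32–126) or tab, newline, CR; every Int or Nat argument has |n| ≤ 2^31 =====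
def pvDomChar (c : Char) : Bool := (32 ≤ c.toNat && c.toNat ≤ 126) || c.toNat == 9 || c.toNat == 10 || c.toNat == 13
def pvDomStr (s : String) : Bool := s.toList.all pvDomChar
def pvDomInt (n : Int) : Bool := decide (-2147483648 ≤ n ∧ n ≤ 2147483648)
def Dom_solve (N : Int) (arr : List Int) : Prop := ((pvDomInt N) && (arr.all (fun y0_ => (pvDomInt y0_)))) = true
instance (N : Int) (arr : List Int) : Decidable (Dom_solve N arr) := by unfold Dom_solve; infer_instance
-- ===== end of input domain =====

-- B counts each sorted subarray at its right endpoint (running dp, one pass over arr, no sentinel);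
-- A sweeps arr+[0] and flushes count*(count-1)//2 per run. Same cost; B avoids the sentinel bug noted in D_.

-- ===== PORT A =====
def solveStep (s : Int × Int × Int) (n : Int) : Int × Int × Int :=
  if n > s.2.2 then (s.1, s.2.1 + 1, n)
  else (s.1 + PySem.Int.floordiv (s.2.1 * (s.2.1 - 1)) 2, 1, n)

def solve (N : Int) (arr : List Int) : Int :=
  ((arr ++ [0]).foldl solveStep (0, 0, 0)).1 + N

-- ===== PORT B =====
def solveAltStep (s : Int × Int × Option Int) (x : Int) : Int × Int × Option Int :=
  let dp : Int := match s.2.2 with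
    | some p => if x > p then s.2.1 + 1 else 1
    | none => 1
  (s.1 + (dp - 1), dp, some x)

def solve_alt (N : Int) (arr : List Int) : Int :=
  (arr.foldl solveAltStep (N, 0, none)).1

-- ===== PRECONDITION & SPEC =====
-- A returns too small a value when the final run of arr is negative and has length ≥ 2: the sentinel 0
-- extends the run instead of flushing it, so its count*(count-1)//2 is never added; B returns the full count.
def D_solve (N : Int) (arr : List Int) : Prop :=
  2 ≤ arr.length ∧ arr.getLastD 0 < 0 ∧ arr.dropLast.getLastD 0 < arr.getLastD 0
instance (N : Int) (arr : List Int) : Decidable (D_solve N arr) := by unfold D_solve; infer_instance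

def Spec_solve (N : Int) (arr : List Int) (out : Int) : Prop := ¬ D_solve N arr → out = solve_alt N arr
instance (N : Int) (arr : List Int) (out : Int) : Decidable (Spec_solve N arr out) := by unfold Spec_solve; infer_instance

def pvDiffWitness_solve : Int × List Int := (2, [-3, -2])
def pvDiffWitnessOut_solve : Int × Int := (2, 3)

-- ===== CLAIM (what is proved, stated in full; the proofs are below) =====
def Claim_unchanged_solve : Prop := ∀ (N : Int) (arr : List Int), Dom_solve N arr → Spec_solve N arr (solve N arr)
def Claim_changed_solve : Prop := Dom_solve (pvDiffWitness_solve.1) (pvDiffWitness_solve.2) ∧ D_solve (pvDiffWitness_solve.1) (pvDiffWitness_solve.2) ∧ solve (pvDiffWitness_solve.1) (pvDiffWitness_solve.2) = pvDiffWitnessOut_solve.1 ∧ solve_alt (pvDiffWitness_solve.1) (pvDiffWitness_solve.2) = pvDiffWitnessOut_solve.2 ∧ pvDiffWitnessOut_solve.1 ≠ pvDiffWitnessOut_solve.2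
def Claim_exact_solve : Prop := ∀ (N : Int) (arr : List Int), Dom_solve N arr → D_solve N arr → solve N arr ≠ solve_alt N arr

-- ===== LEMMAS AND PROOFS =====

lemma tri_step (c : Int) :
    PySem.Int.floordiv (c * (c - 1)) 2 + c = PySem.Int.floordiv ((c + 1) * c) 2 := by
  rw [PySem.Int.floordiv_eq_ediv_of_pos (by norm_num), PySem.Int.floordiv_eq_ediv_of_pos (by norm_num)]
  have h : (c + 1) * c = c * (c - 1) + c * 2 := by ring
  rw [h, Int.add_mul_ediv_right _ _ (by norm_num)]

-- main invariant: B's fold from a matched state tracks A's fold, carrying the current run's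
-- triangular contribution inside the total (K is B's extra constant, here N).
lemma inv (arr : List Int) : ∀ (a c l K : Int),
    arr.foldl solveAltStep (a + PySem.Int.floordiv (c * (c - 1)) 2 + K, c, some l) =
      (let s := arr.foldl solveStep (a, c, l);
       (s.1 + PySem.Int.floordiv (s.2.1 * (s.2.1 - 1)) 2 + K, s.2.1, some s.2.2)) := by
  induction arr with
  | nil => intro a c l K; simp
  | cons x xs ih =>
    intro a c l K
    by_cases h : x > l
    · have hstep : solveAltStep (a + PySem.Int.floordiv (c * (c - 1)) 2 + K, c, some l) x
          = (a + PySem.Int.floordiv ((c + 1) * c) 2 + K, c + 1, some x) := by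
        simp only [solveAltStep, if_pos h]
        rw [← tri_step c]; ring_nf
      simp only [List.foldl_cons, hstep, solveStep, if_pos h]
      have := ih a (c + 1) x K
      simpa using this
    · have hstep : solveAltStep (a + PySem.Int.floordiv (c * (c - 1)) 2 + K, c, some l) x
          = ((a + PySem.Int.floordiv (c * (c - 1)) 2) + PySem.Int.floordiv (1 * (1 - 1)) 2 + K, 1, some x) := by
        simp only [solveAltStep, if_neg h]
        norm_num [PySem.Int.floordiv]
      simp only [List.foldl_cons, hstep, solveStep, if_neg h]
      have := ih (a + PySem.Int.floordiv (c * (c - 1)) 2) 1 x K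
      simpa using this

-- the 'last' component of A's fold state is the last element processed
lemma lastA (xs : List Int) : ∀ (a c l : Int), (xs.foldl solveStep (a, c, l)).2.2 = xs.getLastD l := by
  induction xs with
  | nil => intro a c l; simp
  | cons y ys ih =>
    intro a c l
    simp only [List.foldl_cons, List.getLastD_cons]
    unfold solveStep
    split <;> exact ih _ _ _

-- A's first step from the initial state always yields count 1 and answer 0
lemma firstA (x : Int) : solveStep (0, 0, 0) x = (0, 1, x) := by
  unfold solveStep
  split <;> norm_num [PySem.Int.floordiv]

-- A's count stays ≥ 1 once positive
lemma countA_pos (xs : List Int) : ∀ (a c l : Int), 1 ≤ c → 1 ≤ (xs.foldl solveStep (a, c, l)).2.1 := by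
  induction xs with
  | nil => intro a c l h; simpa using h
  | cons y ys ih =>
    intro a c l h
    by_cases hyx : y > l
    · have hs : solveStep (a, c, l) y = (a, c + 1, y) := by simp [solveStep, hyx]
      rw [List.foldl_cons, hs]
      exact ih _ _ _ (by omega)
    · have hs : solveStep (a, c, l) y = (a + PySem.Int.floordiv (c * (c - 1)) 2, 1, y) := by
        simp [solveStep, hyx]
      rw [List.foldl_cons, hs]
      exact ih _ _ _ le_rfl

-- A's count after processing …++[q]: extend iff q beats the previous last element
lemma countA_concat (zs : List Int) (a c l q : Int) :
    ((zs ++ [q]).foldl solveStep (a, c, l)).2.1 =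
      if q > zs.getLastD l then (zs.foldl solveStep (a, c, l)).2.1 + 1 else 1 := by
  rw [List.foldl_append]
  rcases hs : zs.foldl solveStep (a, c, l) with ⟨a', c', l'⟩
  have hl : l' = zs.getLastD l := by have := lastA zs a c l; rw [hs] at this; exact this
  simp only [List.foldl_cons, List.foldl_nil, solveStep, hl]
  split <;> simp

-- core computation: both results for nonempty arr, expressed through the shared fold over the tail
lemma solve_eq (N x : Int) (xs : List Int) :
    solve N (x :: xs) =
      (let s := xs.foldl solveStep (0, 1, x);
       if (0 : Int) > xs.getLastD x then s.1 + N
       else s.1 + PySem.Int.floordiv (s.2.1 * (s.2.1 - 1)) 2 + N) := by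
  unfold solve
  rw [List.cons_append, List.foldl_cons, firstA, List.foldl_append]
  simp only [List.foldl_cons, List.foldl_nil]
  rw [← lastA xs 0 1 x]
  unfold solveStep
  split <;> simp

lemma solve_alt_eq (N x : Int) (xs : List Int) :
    solve_alt N (x :: xs) =
      (let s := xs.foldl solveStep (0, 1, x);
       s.1 + PySem.Int.floordiv (s.2.1 * (s.2.1 - 1)) 2 + N) := by
  unfold solve_alt
  rw [List.foldl_cons]
  have h0 : solveAltStep (N, 0, none) x = (N, 1, some x) := by
    simp [solveAltStep]
  rw [h0]
  have h1 : (N, (1 : Int), some x) =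
      ((0 : Int) + PySem.Int.floordiv ((1 : Int) * (1 - 1)) 2 + N, (1 : Int), some x) := by
    norm_num [PySem.Int.floordiv]
  rw [h1, inv]

lemma tri_pos (c : Int) (h : 2 ≤ c) : 1 ≤ PySem.Int.floordiv (c * (c - 1)) 2 := by
  rw [PySem.Int.floordiv_eq_ediv_of_pos (by norm_num)]
  have h2 : 2 ≤ c * (c - 1) := by nlinarith
  omega

-- ===== VERDICT (by name: the statement is the Claim_ definition above) =====
theorem solve_spec : Claim_unchanged_solve := by
  intro N arr _ hD
  cases arr with
  | nil => norm_num [solve, solve_alt, solveStep, solveAltStep, PySem.Int.floordiv]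
  | cons x xs =>
    rw [solve_eq, solve_alt_eq]
    simp only
    split
    · rename_i hneg
      -- final element is negative; show the pending triangular term is 0 (count = 1)
      rcases List.eq_nil_or_concat xs with rfl | ⟨zs, q, he⟩
      · simp [PySem.Int.floordiv]
      · rw [List.concat_eq_append] at he; subst he
        have hq : (x :: (zs ++ [q])).getLastD 0 = q := by
          rw [List.getLastD_eq_getLast?, ← List.cons_append, List.getLast?_concat]; rfl
        have hlast : (zs ++ [q]).getLastD x = q := by simp
        rw [hlast] at hneg
        have hc : ((zs ++ [q]).foldl solveStep (0, 1, x)).2.1 = 1 := by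
          rw [countA_concat]
          rw [if_neg]
          intro hgt
          apply hD
          refine ⟨by simp, ?_, ?_⟩
          · rw [hq]; omega
          · have hdl : (x :: (zs ++ [q])).dropLast = x :: zs := by
              rw [← List.cons_append, List.dropLast_concat]
            rw [hdl, hq, List.getLastD_cons]
            exact hgt
        rw [hc]; norm_num [PySem.Int.floordiv]
    · rfl

theorem solve_changed : Claim_changed_solve := by unfold Claim_changed_solve; decide

theorem solve_tight : Claim_exact_solve := by
  intro N arr _ hD
  obtain ⟨hlen, hneg, hinc⟩ := hD
  cases arr with
  | nil => simp at hlen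
  | cons x xs =>
    rcases List.eq_nil_or_concat xs with rfl | ⟨zs, q, he⟩
    · simp at hlen
    · rw [List.concat_eq_append] at he; subst he
      have hq : (x :: (zs ++ [q])).getLastD 0 = q := by
        rw [List.getLastD_eq_getLast?, ← List.cons_append, List.getLast?_concat]; rfl
      have hdl : (x :: (zs ++ [q])).dropLast = x :: zs := by
        rw [← List.cons_append, List.dropLast_concat]
      rw [hq] at hneg
      rw [hdl, hq, List.getLastD_cons] at hinc
      rw [solve_eq, solve_alt_eq]
      simp only
      have hlast : (zs ++ [q]).getLastD x = q := by simp
      rw [hlast, if_pos (by omega)]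
      have hc : 2 ≤ ((zs ++ [q]).foldl solveStep (0, 1, x)).2.1 := by
        rw [countA_concat, if_pos hinc]
        have := countA_pos zs 0 1 x le_rfl
        omega
      have := tri_pos _ hc
      omega
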